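-- pv_equiv track=rewrite | github.com/csre7144/Python_Practical | DSA/remove_string.py | remove_invalid_closing
-- ===== SOURCE A (Python) =====
-- def remove_invalid_closing(s):
--     s = list(s)
--     i = 0
--     j = 0
--     count = 0
--     n = len(s)
--
--     while j < n:
--         if s[j] == '(':
--             s[i] = s[j]
--             i += 1
--             count += 1
--         elif s[j] != ')':  # character is not a parenthesis
--             s[i] = s[j]
--             i += 1
--         else:  # s[j] == ')'
--             if count == 0:
--                 j += 1
--                 continue
--             s[i] = s[j]
--             i += 1
--             count -= 1
--         j += 1
--
--     return ''.join(s[:i])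
-- ===== SOURCE B (Python) =====
-- def remove_invalid_closing(s):
--     # Pass 1: stack of indices of '('; unmatched ')' positions go into a deletion set.
--     stack = []
--     dels = set()
--     for j, c in enumerate(s):
--         if c == '(':
--             stack.append(j)
--         elif c == ')':
--             if stack:
--                 stack.pop()
--             else:
--                 dels.add(j)
--     # Pass 2: keep every character whose index was not marked for deletion.
--     return ''.join(c for j, c in enumerate(s) if j not in dels)
-- ===== Notes on version B (the rewrite author's own statement) =====
-- stated objective: alternative
-- what changed: Replaces A's single-pass in-place compaction with a write pointer and a counter by a two-pass algorithm: a stack of open-paren indices collects the set of unmatched closing-paren positions, then the output is rebuilt by joining every character whose index is not in that deletion set.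
import Mathlib
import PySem

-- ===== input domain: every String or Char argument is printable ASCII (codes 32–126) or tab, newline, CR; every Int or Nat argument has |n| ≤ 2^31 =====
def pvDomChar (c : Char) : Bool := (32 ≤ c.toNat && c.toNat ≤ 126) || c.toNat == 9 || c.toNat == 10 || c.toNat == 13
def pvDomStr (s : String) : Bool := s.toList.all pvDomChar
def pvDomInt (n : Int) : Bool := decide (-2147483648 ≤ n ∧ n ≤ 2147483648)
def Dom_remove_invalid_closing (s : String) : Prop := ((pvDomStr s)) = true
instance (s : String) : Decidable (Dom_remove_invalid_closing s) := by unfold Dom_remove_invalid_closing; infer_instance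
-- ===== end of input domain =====

-- B is an alternative two-pass algorithm (deletion set of unmatched ')' indices) of the same cost; not claimed faster.

-- ===== PORT A =====
-- A's while loop compacts kept characters in place with a write pointer i and returns s[:i];
-- the port accumulates exactly those kept characters, carrying the counter as Python's int.
def removeLoopA : List Char → Int → List Char
  | [], _ => []
  | c :: rest, count =>
    if c = '(' then c :: removeLoopA rest (count + 1)
    else if c ≠ ')' then c :: removeLoopA rest count
    else if count = 0 then removeLoopA rest count
    else c :: removeLoopA rest (count - 1)

def remove_invalid_closing (s : String) : String :=
  String.mk (removeLoopA s.toList 0)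

-- ===== PORT B =====
-- Pass 1 of Source B: walk with index j, stack of '(' indices, deletion set of unmatched ')' indices.
def removePass1 : List Char → Nat → List Nat → PySem.Set Nat → PySem.Set Nat
  | [], _, _, dels => dels
  | c :: rest, j, stack, dels =>
    if c = '(' then removePass1 rest (j + 1) (j :: stack) dels
    else if c = ')' then
      match stack with
      | [] => removePass1 rest (j + 1) [] (PySem.Set.add dels j)
      | _ :: st => removePass1 rest (j + 1) st dels
    else removePass1 rest (j + 1) stack dels

-- Pass 2 of Source B: the join of characters whose index is not in the deletion set.
def removePass2 : List Char → Nat → PySem.Set Nat → List Char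
  | [], _, _ => []
  | c :: rest, j, dels =>
    if j ∈ dels then removePass2 rest (j + 1) dels
    else c :: removePass2 rest (j + 1) dels

def remove_invalid_closing_alt (s : String) : String :=
  String.mk (removePass2 s.toList 0 (removePass1 s.toList 0 [] PySem.Set.empty))

-- ===== PRECONDITION & SPEC =====
def Spec_remove_invalid_closing (s : String) (out : String) : Prop := out = remove_invalid_closing_alt s
instance (s : String) (out : String) : Decidable (Spec_remove_invalid_closing s out) := by unfold Spec_remove_invalid_closing; infer_instance

-- ===== CLAIM (what is proved, stated in full; the proofs are below) =====
def Claim_equal_remove_invalid_closing : Prop := ∀ (s : String), Dom_remove_invalid_closing s → Spec_remove_invalid_closing s (remove_invalid_closing s)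

-- ===== LEMMAS AND PROOFS =====

-- Everything already in the deletion set stays in it.
theorem removePass1_mono (rest : List Char) (j : Nat) (stack : List Nat)
    (dels : PySem.Set Nat) {x : Nat} (hx : x ∈ dels) :
    x ∈ removePass1 rest j stack dels := by
  induction rest generalizing j stack dels with
  | nil => simpa [removePass1] using hx
  | cons c rest ih =>
    simp only [removePass1]
    split_ifs with h1 h2
    · exact ih _ _ _ hx
    · cases stack with
      | nil => exact ih _ _ _ ((PySem.Set.mem_add _ _ _).mpr (Or.inl hx))
      | cons t st => exact ih _ _ _ hx
    · exact ih _ _ _ hx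

-- Any member of the final deletion set was already present or has index ≥ j.
theorem removePass1_bound (rest : List Char) (j : Nat) (stack : List Nat)
    (dels : PySem.Set Nat) {x : Nat} (hx : x ∈ removePass1 rest j stack dels) :
    x ∈ dels ∨ j ≤ x := by
  induction rest generalizing j stack dels with
  | nil => exact Or.inl (by simpa [removePass1] using hx)
  | cons c rest ih =>
    simp only [removePass1] at hx
    split_ifs at hx with h1 h2
    · rcases ih _ _ _ hx with h | h
      · exact Or.inl h
      · exact Or.inr (by omega)
    · cases stack with
      | nil =>
        rcases ih _ _ _ hx with h | h
        · rcases (PySem.Set.mem_add _ _ _).mp h with h' | h'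
          · exact Or.inl h'
          · exact Or.inr (by omega)
        · exact Or.inr (by omega)
      | cons t st =>
        rcases ih _ _ _ hx with h | h
        · exact Or.inl h
        · exact Or.inr (by omega)
    · rcases ih _ _ _ hx with h | h
      · exact Or.inl h
      · exact Or.inr (by omega)

-- Main invariant: filtering the suffix by the final deletion set equals A's loop,
-- provided the counter equals the stack depth and all recorded indices are < j.
theorem remove_key (rest : List Char) (j : Nat) (stack : List Nat)
    (dels : PySem.Set Nat) (hd : ∀ x ∈ dels, x < j) :
    removePass2 rest j (removePass1 rest j stack dels)
      = removeLoopA rest (stack.length : Int) := by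
  induction rest generalizing j stack dels with
  | nil => simp [removePass1, removePass2, removeLoopA]
  | cons c rest ih =>
    have hjnot : ∀ (st : List Nat) (d : PySem.Set Nat), (∀ x ∈ d, x < j) →
        j ∉ removePass1 rest (j + 1) st d := by
      intro st d hdd hj
      rcases removePass1_bound rest (j + 1) st d hj with h | h
      · exact absurd (hdd _ h) (by omega)
      · omega
    by_cases h1 : c = '('
    · have e1 : removePass1 (c :: rest) j stack dels
          = removePass1 rest (j + 1) (j :: stack) dels := by
        simp [removePass1, h1]
      have hD := hjnot (j :: stack) dels hd
      have e2 : removePass2 (c :: rest) j (removePass1 rest (j + 1) (j :: stack) dels)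
          = c :: removePass2 rest (j + 1) (removePass1 rest (j + 1) (j :: stack) dels) := by
        simp [removePass2, hD]
      rw [e1, e2, ih (j + 1) (j :: stack) dels (fun x hx => by have := hd x hx; omega)]
      simp only [removeLoopA, h1, if_pos rfl, List.length_cons]
      push_cast
      ring_nf
    · by_cases h2 : c = ')'
      · cases stack with
        | nil =>
          have e1 : removePass1 (c :: rest) j [] dels
              = removePass1 rest (j + 1) [] (PySem.Set.add dels j) := by
            simp [removePass1, h1, h2]
          have hjin : j ∈ removePass1 rest (j + 1) [] (PySem.Set.add dels j) :=
            removePass1_mono _ _ _ _ ((PySem.Set.mem_add _ _ _).mpr (Or.inr rfl))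
          have e2 : removePass2 (c :: rest) j (removePass1 rest (j + 1) [] (PySem.Set.add dels j))
              = removePass2 rest (j + 1) (removePass1 rest (j + 1) [] (PySem.Set.add dels j)) := by
            simp [removePass2, hjin]
          have hd' : ∀ x ∈ PySem.Set.add dels j, x < j + 1 := by
            intro x hx
            rcases (PySem.Set.mem_add _ _ _).mp hx with h | h
            · have := hd x h; omega
            · omega
          rw [e1, e2, ih (j + 1) [] (PySem.Set.add dels j) hd']
          simp [removeLoopA, h1, h2]
        | cons t st =>
          have e1 : removePass1 (c :: rest) j (t :: st) dels
              = removePass1 rest (j + 1) st dels := by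
            simp [removePass1, h1, h2]
          have hD := hjnot st dels hd
          have e2 : removePass2 (c :: rest) j (removePass1 rest (j + 1) st dels)
              = c :: removePass2 rest (j + 1) (removePass1 rest (j + 1) st dels) := by
            simp [removePass2, hD]
          rw [e1, e2, ih (j + 1) st dels (fun x hx => by have := hd x hx; omega)]
          have hne : ((t :: st).length : Int) ≠ 0 := by
            simp only [List.length_cons]; push_cast; omega
          simp only [removeLoopA, h1, h2, if_neg h1, if_neg (by simp : ¬(')' : Char) ≠ ')'),
            if_neg hne, List.length_cons]
          push_cast
          ring_nf
          rw [if_neg (by omega : ¬(1 + (st.length : Int)) = 0)]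
      · have e1 : removePass1 (c :: rest) j stack dels
            = removePass1 rest (j + 1) stack dels := by
          simp [removePass1, h1, h2]
        have hD := hjnot stack dels hd
        have e2 : removePass2 (c :: rest) j (removePass1 rest (j + 1) stack dels)
            = c :: removePass2 rest (j + 1) (removePass1 rest (j + 1) stack dels) := by
          simp [removePass2, hD]
        rw [e1, e2, ih (j + 1) stack dels (fun x hx => by have := hd x hx; omega)]
        simp [removeLoopA, h1, h2]

-- ===== VERDICT (by name: the statement is the Claim_ definition above) =====
theorem remove_invalid_closing_spec : Claim_equal_remove_invalid_closing := by
  intro s _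
  unfold Spec_remove_invalid_closing remove_invalid_closing remove_invalid_closing_alt
  have := remove_key s.toList 0 [] PySem.Set.empty (by simp [PySem.Set.empty])
  rw [this]
  simp
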